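-- pv_equiv track=rewrite | github.com/PJ-Samuels/CS-131 | ps6.py | is_partition
-- ===== SOURCE A (Python) =====
-- def is_partition(s,p):
--         ans=set()
--         c=0
--         for i in p:
--                 ans=ans | i
--         if ans == s:
--                 c=1
--         else:
--                 return False
--
--         for i in range(0,len(p)):
--                 for j in range(i+1,len(p)):
--                         if len(list(p[i] & p[j]))!=0:
--                                 return False
--         return True
-- ===== SOURCE B (Python) =====
-- def is_partition(s, p):
--     # single pass: union of the blocks plus total element count;
--     # blocks (being sets) are pairwise disjoint iff the sizes add up to the union's size
--     union = set()
--     total = 0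
--     for block in p:
--         union |= block
--         total += len(block)
--     return union == s and total == len(union)
-- ===== Notes on version B (the rewrite author's own statement) =====
-- stated objective: simpler
-- what changed: replaces the quadratic pairwise-intersection disjointness check with a single pass that sums block sizes and compares the sum with the union's size
import Mathlib
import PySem

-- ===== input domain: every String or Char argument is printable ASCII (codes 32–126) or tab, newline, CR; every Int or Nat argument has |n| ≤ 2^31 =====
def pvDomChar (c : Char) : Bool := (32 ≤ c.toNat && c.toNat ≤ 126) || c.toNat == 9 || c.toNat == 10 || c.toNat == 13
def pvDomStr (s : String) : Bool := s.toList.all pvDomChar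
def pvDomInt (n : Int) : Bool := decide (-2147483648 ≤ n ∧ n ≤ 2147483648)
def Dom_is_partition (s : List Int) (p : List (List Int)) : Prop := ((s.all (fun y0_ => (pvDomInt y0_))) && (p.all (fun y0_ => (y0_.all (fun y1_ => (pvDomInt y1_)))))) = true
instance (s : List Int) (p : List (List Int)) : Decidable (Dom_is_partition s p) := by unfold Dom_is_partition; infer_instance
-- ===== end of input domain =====

-- B replaces A's pairwise-intersection disjointness check by a single pass summing
-- block sizes and comparing the sum with the union's size (objective: simpler).


-- ===== PORT A =====
-- A's two index loops 'for i … for j in range(i+1,…)' with early 'return False':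
-- recursion on the block list, each head checked against every later block.
def pvPairsA : List (List Int) → Bool
  | [] => true
  | x :: rest =>
      (rest.all fun y => PySem.Set.len (PySem.Set.inter x y) == 0) && pvPairsA rest

def is_partition (s : List Int) (p : List (List Int)) : Bool :=
  -- ans = set(); for i in p: ans = ans | i   (the variable c of A is dead and dropped)
  let ans := p.foldl (fun a i => PySem.Set.union a i) PySem.Set.empty
  if PySem.Set.equal ans s then pvPairsA p else false

-- ===== PORT B =====
def is_partition_alt (s : List Int) (p : List (List Int)) : Bool :=
  let st := p.foldl
    (fun (acc : PySem.Set Int × Int) block =>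
      (PySem.Set.union acc.1 block, acc.2 + PySem.Set.len block))
    ((PySem.Set.empty : PySem.Set Int), (0 : Int))
  PySem.Set.equal st.1 s && (st.2 == PySem.Set.len st.1)

-- ===== PRECONDITION & SPEC =====
-- The elements of p are Python sets (p : list[set[int]]); a Lean list with a duplicated
-- element inside a block represents no Python input, so Pre_ requires each block Nodup.
def Pre_is_partition (s : List Int) (p : List (List Int)) : Prop := ∀ x ∈ p, x.Nodup
instance (s : List Int) (p : List (List Int)) : Decidable (Pre_is_partition s p) := by
  unfold Pre_is_partition; infer_instance
def pvWitness_is_partition : List Int × List (List Int) := ([1, 2, 3], [[1, 2], [3]])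

def Spec_is_partition (s : List Int) (p : List (List Int)) (out : Bool) : Prop := out = is_partition_alt s p
instance (s : List Int) (p : List (List Int)) (out : Bool) : Decidable (Spec_is_partition s p out) := by unfold Spec_is_partition; infer_instance

-- ===== CLAIM (what is proved, stated in full; the proofs are below) =====
def Claim_equal_is_partition : Prop := ∀ (s : List Int) (p : List (List Int)), Dom_is_partition s p → Pre_is_partition s p → Spec_is_partition s p (is_partition s p)

-- ===== LEMMAS AND PROOFS =====

-- length of one union step
lemma pv_len_union (acc x : List Int) :
    (PySem.Set.union acc x).length
      = acc.length + ((PySem.Set.ofList x).filter (fun y => !(PySem.Set.contains acc y))).length := by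
  show (PySem.Set.update acc x).length = _
  rw [PySem.Set.update_eq_append_filter]
  simp

lemma pv_len_union_le (acc x : List Int) :
    (PySem.Set.union acc x).length ≤ acc.length + x.length := by
  rw [pv_len_union]
  have h1 := List.length_filter_le (fun y => !(PySem.Set.contains acc y)) (PySem.Set.ofList x)
  have h2 := PySem.Set.length_ofList_le (xs := x)
  omega

lemma pv_foldl_union_le (p : List (List Int)) (acc : List Int) :
    (p.foldl (fun a i => PySem.Set.union a i) acc).length
      ≤ acc.length + (p.map List.length).sum := by
  induction p generalizing acc with
  | nil => simp
  | cons x rest ih =>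
      simp only [List.foldl_cons, List.map_cons, List.sum_cons]
      have h := ih (PySem.Set.union acc x)
      have h2 := pv_len_union_le acc x
      omega

-- the disjointness test A runs on one pair
lemma pv_inter_empty_iff (x y : List Int) :
    ((PySem.Set.len (PySem.Set.inter x y) == 0) = true) ↔ ∀ a ∈ x, a ∉ y := by
  rw [show PySem.Set.inter x y = x.filter (fun a => y.contains a) from rfl]
  simp [PySem.Set.len, List.length_eq_zero_iff, List.filter_eq_nil_iff]

-- key invariant: the union's length reaches acc.length + Σ|block| exactly when the blocks
-- are disjoint from acc and pairwise disjoint (A's pvPairsA test)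
lemma pv_key (p : List (List Int)) (acc : List Int) (hacc : acc.Nodup)
    (hp : ∀ x ∈ p, x.Nodup) :
    ((p.foldl (fun a i => PySem.Set.union a i) acc).length
        = acc.length + (p.map List.length).sum)
      ↔ ((∀ x ∈ p, ∀ a ∈ x, a ∉ acc) ∧ pvPairsA p = true) := by
  induction p generalizing acc with
  | nil => simp [pvPairsA]
  | cons x rest ih =>
      have hx : x.Nodup := hp x (by simp)
      have hrest : ∀ b ∈ rest, b.Nodup := fun b hb => hp b (List.mem_cons_of_mem _ hb)
      have hacc' : (PySem.Set.union acc x).Nodup := PySem.Set.nodup_union acc x hacc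
      have ihx := ih (PySem.Set.union acc x) hacc' hrest
      simp only [List.foldl_cons, List.map_cons, List.sum_cons]
      -- length of the first union step
      have hstep := pv_len_union acc x
      have hofx : PySem.Set.ofList x = x := PySem.Set.ofList_eq_self_of_nodup x hx
      rw [hofx] at hstep
      have hfle := List.length_filter_le (fun y => !(PySem.Set.contains acc y)) x
      have hle := pv_foldl_union_le rest (PySem.Set.union acc x)
      -- filter keeps everything iff x is disjoint from acc
      have hfilter : ((x.filter (fun y => !(PySem.Set.contains acc y))).length = x.length)
          ↔ ∀ a ∈ x, a ∉ acc := by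
        rw [List.length_filter_eq_length_iff]
        simp
      constructor
      · intro h
        have hfx : (x.filter (fun y => !(PySem.Set.contains acc y))).length = x.length := by omega
        have hxacc := hfilter.mp hfx
        have hrec : (rest.foldl (fun a i => PySem.Set.union a i) (PySem.Set.union acc x)).length
            = (PySem.Set.union acc x).length + (rest.map List.length).sum := by omega
        obtain ⟨hdisj, hpairs⟩ := ihx.mp hrec
        refine ⟨?_, ?_⟩
        · intro b hb a ha
          rcases List.mem_cons.mp hb with rfl | hb
          · exact hxacc a ha
          · intro hmem
            exact hdisj b hb a ha (by rw [PySem.Set.mem_union]; exact Or.inl hmem)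
        · show ((rest.all fun y => PySem.Set.len (PySem.Set.inter x y) == 0) && pvPairsA rest) = true
          rw [Bool.and_eq_true, List.all_eq_true]
          refine ⟨fun y hy => (pv_inter_empty_iff x y).mpr ?_, hpairs⟩
          intro a ha hay
          exact hdisj y hy a hay (by rw [PySem.Set.mem_union]; exact Or.inr ha)
      · rintro ⟨hdisj, hpairs⟩
        have hxacc : ∀ a ∈ x, a ∉ acc := fun a ha => hdisj x (by simp) a ha
        have hfx := hfilter.mpr hxacc
        simp only [pvPairsA, Bool.and_eq_true, List.all_eq_true] at hpairs
        obtain ⟨hall, hpairs'⟩ :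
            (∀ y ∈ rest, (PySem.Set.len (PySem.Set.inter x y) == 0) = true) ∧ pvPairsA rest = true := hpairs
        have hdisj' : ∀ b ∈ rest, ∀ a ∈ b, a ∉ PySem.Set.union acc x := by
          intro b hb a ha hmem
          rw [PySem.Set.mem_union] at hmem
          rcases hmem with h | h
          · exact hdisj b (List.mem_cons_of_mem _ hb) a ha h
          · exact (pv_inter_empty_iff x b).mp (hall b hb) a h ha
        have := ihx.mpr ⟨hdisj', hpairs'⟩
        omega

-- B's fold over a pair splits into the union fold and the length sum
lemma pv_alt_fold (p : List (List Int)) (acc : List Int) (n : Int) :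
    p.foldl (fun (acc : PySem.Set Int × Int) block =>
        (PySem.Set.union acc.1 block, acc.2 + PySem.Set.len block)) (acc, n)
      = (p.foldl (fun a i => PySem.Set.union a i) acc,
         n + ((p.map List.length).sum : Int)) := by
  induction p generalizing acc n with
  | nil => simp
  | cons x rest ih =>
      simp only [List.foldl_cons]
      rw [ih]
      simp only [List.map_cons, List.sum_cons, PySem.Set.len]
      congr 1
      push_cast
      ring

-- ===== VERDICT (by name: the statement is the Claim_ definition above) =====
theorem is_partition_spec : Claim_equal_is_partition := by
  intro s p _ hpre
  unfold Spec_is_partition is_partition is_partition_alt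
  rw [pv_alt_fold]
  set U := p.foldl (fun a i => PySem.Set.union a i) PySem.Set.empty with hU
  by_cases h : PySem.Set.equal U s = true
  · simp only [h, if_pos, Bool.true_and]
    have hkey := pv_key p PySem.Set.empty (by simp [PySem.Set.empty]) hpre
    have hkey2 : ((p.foldl (fun a i => PySem.Set.union a i) PySem.Set.empty).length
        = (p.map List.length).sum) ↔ pvPairsA p = true := by
      rw [show (PySem.Set.empty : PySem.Set Int).length = 0 from rfl, Nat.zero_add] at hkey
      rw [hkey]
      simp [PySem.Set.empty]
    rw [Bool.eq_iff_iff, beq_iff_eq]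
    simp only [PySem.Set.len, zero_add, Int.natCast_inj]
    rw [← hkey2]
    exact ⟨fun hh => hh.symm, fun hh => hh.symm⟩
  · simp [h]
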